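-- pv_equiv track=rewrite | github.com/zhipeng-cai/FastLog | src/stage2_trainer.py | get_actual_input
-- ===== SOURCE A (Python) =====
-- import math
--
-- max_input_length = 512
--
-- seq_chunk_max_len = 300
--
-- context_len = (max_input_length - seq_chunk_max_len) // 2
--
-- context_statement_num = 5
--
-- mask_token_id = 50004
--
-- def find_left_context_start(token_ids, start, end):
--     if end >= len(token_ids):
--         needed_statemens = 2 * context_statement_num
--         search_end = start - 2 * context_len - 1
--     else:
--         needed_statemens = context_statement_num
--         search_end = start - context_len - 1
--     found = 0
--     found_start = start
--     for i in range(start - 2, max(-1, search_end), -1):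
--         if token_ids[i] == 65 or token_ids[i] == 43:
--             found_start = i + 1
--             found += 1
--         if found == needed_statemens:
--             return found_start if found_start >= 0 else 0
--     return found_start if found_start >= 0 else 0
--
-- def find_right_context_end(token_ids, start, end):
--     if start == 0:
--         needed_statemens = 2 * context_statement_num
--         search_end = end + 2 * context_len
--     else:
--         needed_statemens = context_statement_num
--         search_end = end + context_len
--     found = 0
--     found_end = end
--     for i in range(end, min(len(token_ids), search_end)):
--         if token_ids[i] == 65 or token_ids[i] == 43:
--             found_end = i + 1
--             found += 1
--         if found == needed_statemens:
--             return found_end if found_end <= len(token_ids) else len(token_ids)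
--     return found_end if found_end <= len(token_ids) else len(token_ids)
--
-- def get_actual_input(token_ids):
--     if mask_token_id not in token_ids:
--         return 0, max_input_length
--     start_idx = 0
--     end_idx = len(token_ids)
--     chunks_num = math.ceil(len(token_ids) / seq_chunk_max_len)
--     chunks_len = math.ceil(len(token_ids) / chunks_num)
--     for i in range(0, len(token_ids), chunks_len):
--         if mask_token_id in token_ids[i: i + chunks_len]:
--             start_idx = i
--             end_idx = min(len(token_ids), i + chunks_len)
--             break
--     actual_start = find_left_context_start(token_ids, start_idx, end_idx)
--     actual_end = find_right_context_end(token_ids, start_idx, end_idx)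
--     return actual_start, actual_end
-- ===== SOURCE B (Python) =====
-- import math
--
-- max_input_length = 512
-- seq_chunk_max_len = 300
-- context_len = (max_input_length - seq_chunk_max_len) // 2
-- context_statement_num = 5
-- mask_token_id = 50004
--
-- def _left_context_start(token_ids, start_idx, end_idx):
--     n = len(token_ids)
--     if end_idx >= n:
--         needed, lo = 2 * context_statement_num, start_idx - 2 * context_len
--     else:
--         needed, lo = context_statement_num, start_idx - context_len
--     hits = [i + 1 for i in range(max(0, lo), start_idx - 1)
--             if token_ids[i] in (65, 43)]
--     if needed <= len(hits):
--         return hits[len(hits) - needed]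
--     if hits:
--         return hits[0]
--     return start_idx
--
-- def _right_context_end(token_ids, start_idx, end_idx):
--     n = len(token_ids)
--     if start_idx == 0:
--         needed, hi = 2 * context_statement_num, end_idx + 2 * context_len
--     else:
--         needed, hi = context_statement_num, end_idx + context_len
--     hits = [i + 1 for i in range(end_idx, min(n, hi))
--             if token_ids[i] in (65, 43)]
--     if needed <= len(hits):
--         return hits[needed - 1]
--     if hits:
--         return hits[-1]
--     return end_idx
--
-- def get_actual_input(token_ids):
--     if mask_token_id not in token_ids:
--         return 0, max_input_length
--     n = len(token_ids)
--     chunks_num = -(-n // seq_chunk_max_len)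
--     chunks_len = -(-n // chunks_num)
--     pos = token_ids.index(mask_token_id)
--     start_idx = pos // chunks_len * chunks_len
--     end_idx = min(n, start_idx + chunks_len)
--     return (_left_context_start(token_ids, start_idx, end_idx),
--             _right_context_end(token_ids, start_idx, end_idx))
-- ===== Notes on version B (the rewrite author's own statement) =====
-- stated objective: simpler
-- what changed: B computes the mask's chunk directly from token_ids.index(mask) with floor-division arithmetic instead of scanning chunk slices, and replaces both counted early-return context scans with one filtered boundary-index list plus a single lookup.
import Mathlib
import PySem

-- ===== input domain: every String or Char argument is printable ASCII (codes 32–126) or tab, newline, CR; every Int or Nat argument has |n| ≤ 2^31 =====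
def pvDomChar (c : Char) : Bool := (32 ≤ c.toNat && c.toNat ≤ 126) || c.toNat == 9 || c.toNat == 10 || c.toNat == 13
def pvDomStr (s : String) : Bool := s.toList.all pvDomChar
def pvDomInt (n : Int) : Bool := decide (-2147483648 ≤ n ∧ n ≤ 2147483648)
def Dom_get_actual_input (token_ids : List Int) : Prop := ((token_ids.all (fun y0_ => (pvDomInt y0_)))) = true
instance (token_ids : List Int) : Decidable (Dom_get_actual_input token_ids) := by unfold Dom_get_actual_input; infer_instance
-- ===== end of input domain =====

-- B replaces A's chunk-scanning loop by direct index arithmetic (pos // chunks_len) and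
-- rewrites both context-window scans as one filtered index list plus a single lookup (objective: simpler).

-- ===== PORT A =====
-- module constants: max_input_length = 512, seq_chunk_max_len = 300,
-- context_len = (512 - 300) // 2 = 106, context_statement_num = 5, mask_token_id = 50004

-- the for-loop of find_left_context_start: state (found, found_start), early return at found == needed
def findLeftLoop (t : List Int) (needed : Int) : List Int → Int → Int → Int
  | [], _, found_start => if 0 ≤ found_start then found_start else 0
  | i :: rest, found, found_start =>
      let found' := if PySem.List.pyGetD t i 0 == 65 || PySem.List.pyGetD t i 0 == 43 then found + 1 else found
      let fs' := if PySem.List.pyGetD t i 0 == 65 || PySem.List.pyGetD t i 0 == 43 then i + 1 else found_start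
      if found' = needed then (if 0 ≤ fs' then fs' else 0)
      else findLeftLoop t needed rest found' fs'

def find_left_context_start (t : List Int) (start : Int) (end_ : Int) : Int :=
  let needed : Int := if end_ ≥ (t.length : Int) then 2 * 5 else 5
  let search_end : Int := if end_ ≥ (t.length : Int) then start - 2 * 106 - 1 else start - 106 - 1
  findLeftLoop t needed (PySem.List.pyRange (start - 2) (max (-1) search_end) (-1)) 0 start

-- the for-loop of find_right_context_end: state (found, found_end), early return at found == needed
def findRightLoop (t : List Int) (needed : Int) : List Int → Int → Int → Int
  | [], _, found_end => if found_end ≤ (t.length : Int) then found_end else (t.length : Int)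
  | i :: rest, found, found_end =>
      let found' := if PySem.List.pyGetD t i 0 == 65 || PySem.List.pyGetD t i 0 == 43 then found + 1 else found
      let fe' := if PySem.List.pyGetD t i 0 == 65 || PySem.List.pyGetD t i 0 == 43 then i + 1 else found_end
      if found' = needed then (if fe' ≤ (t.length : Int) then fe' else (t.length : Int))
      else findRightLoop t needed rest found' fe'

def find_right_context_end (t : List Int) (start : Int) (end_ : Int) : Int :=
  let needed : Int := if start = 0 then 2 * 5 else 5
  let search_end : Int := if start = 0 then end_ + 2 * 106 else end_ + 106
  findRightLoop t needed (PySem.List.pyRange end_ (min (t.length : Int) search_end) 1) 0 end_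

-- the chunk-scanning loop of get_actual_input: first chunk whose slice contains the mask token
def chunkLoop (t : List Int) (n chunks_len : Int) : List Int → Int × Int
  | [] => (0, n)   -- the initial (start_idx, end_idx) = (0, len(token_ids))
  | i :: rest =>
      if (50004 : Int) ∈ PySem.List.slice t (some i) (some (i + chunks_len)) then
        (i, min n (i + chunks_len))
      else chunkLoop t n chunks_len rest

def get_actual_input (token_ids : List Int) : Int × Int :=
  if (50004 : Int) ∈ token_ids then
    let n : Int := token_ids.length
    -- math.ceil(n / k) ported as integer ceiling -((-n) // k); exact (float rounding needs astronomically long lists)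
    let chunks_num : Int := -(PySem.Int.floordiv (-n) 300)
    let chunks_len : Int := -(PySem.Int.floordiv (-n) chunks_num)
    let se := chunkLoop token_ids n chunks_len (PySem.List.pyRange 0 n chunks_len)
    (find_left_context_start token_ids se.1 se.2, find_right_context_end token_ids se.1 se.2)
  else (0, 512)

-- ===== PORT B =====
-- the list comprehension [i + 1 for i in range(lo, hi) if token_ids[i] in (65, 43)]
def hitList (t : List Int) (lo hi : Int) : List Int :=
  ((PySem.List.pyRange lo hi 1).filter
    (fun i => PySem.List.pyGetD t i 0 == 65 || PySem.List.pyGetD t i 0 == 43)).map (· + 1)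

def left_context_start_alt (t : List Int) (start_idx end_idx : Int) : Int :=
  let n : Int := t.length
  let needed : Int := if end_idx ≥ n then 2 * 5 else 5
  let lo : Int := if end_idx ≥ n then start_idx - 2 * 106 else start_idx - 106
  let hits := hitList t (max 0 lo) (start_idx - 1)
  if needed ≤ (hits.length : Int) then PySem.List.pyGetD hits ((hits.length : Int) - needed) 0
  else hits.headD start_idx

def right_context_end_alt (t : List Int) (start_idx end_idx : Int) : Int :=
  let n : Int := t.length
  let needed : Int := if start_idx = 0 then 2 * 5 else 5
  let hi : Int := if start_idx = 0 then end_idx + 2 * 106 else end_idx + 106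
  let hits := hitList t end_idx (min n hi)
  if needed ≤ (hits.length : Int) then PySem.List.pyGetD hits (needed - 1) 0
  else hits.getLastD end_idx

def get_actual_input_alt (token_ids : List Int) : Int × Int :=
  match PySem.List.index? token_ids (50004 : Int) with
  | none => (0, 512)
  | some pos =>
      let n : Int := token_ids.length
      let chunks_num : Int := -(PySem.Int.floordiv (-n) 300)
      let chunks_len : Int := -(PySem.Int.floordiv (-n) chunks_num)
      let start_idx : Int := PySem.Int.floordiv (pos : Int) chunks_len * chunks_len
      let end_idx : Int := min n (start_idx + chunks_len)
      (left_context_start_alt token_ids start_idx end_idx,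
       right_context_end_alt token_ids start_idx end_idx)

-- ===== PRECONDITION & SPEC =====
def Spec_get_actual_input (token_ids : List Int) (out : Int × Int) : Prop := out = get_actual_input_alt token_ids
instance (token_ids : List Int) (out : Int × Int) : Decidable (Spec_get_actual_input token_ids out) := by unfold Spec_get_actual_input; infer_instance

-- ===== CLAIM (what is proved, stated in full; the proofs are below) =====
def Claim_equal_get_actual_input : Prop := ∀ (token_ids : List Int), Dom_get_actual_input token_ids → Spec_get_actual_input token_ids (get_actual_input token_ids)

-- ===== LEMMAS AND PROOFS =====

-- cons form of range(a, b, s) for a positive step s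
lemma pyRange_pos_cons (a b s : Int) (hs : 0 < s) (hab : a < b) :
    PySem.List.pyRange a b s = a :: PySem.List.pyRange (a + s) b s := by
  rw [PySem.List.pyRange_of_pos a b hs, PySem.List.pyRange_of_pos (a+s) b hs]
  have hnn : 0 ≤ (b - a - 1) / s := Int.ediv_nonneg (by omega) (by omega)
  have key : (b - a + s - 1) / s = (b - a - 1) / s + 1 := by
    have h : b - a + s - 1 = (b - a - 1) + 1 * s := by ring
    rw [h, Int.add_mul_ediv_right _ _ (by omega)]
  by_cases h2 : a + s < b
  · have key2 : (b - (a + s) + s - 1) / s = (b - a - 1) / s := by ring_nf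
    rw [if_pos hab, if_pos h2, key, key2]
    have h3 : ((b - a - 1) / s + 1).toNat = ((b - a - 1)/s).toNat + 1 := by omega
    rw [h3, List.range_succ_eq_map, List.map_cons, List.map_map]
    refine congrArg₂ _ (by simp) (List.map_congr_left fun k _ => ?_)
    simp only [Function.comp_apply, Nat.succ_eq_add_one]
    push_cast; ring
  · have hz : (b - a - 1) / s = 0 := Int.ediv_eq_zero_of_lt (by omega) (by omega)
    rw [if_pos hab, if_neg h2, key, hz]
    simp

-- scanning l counting boundary hits with early return at the (needed-found)-th hit equals:
-- index into the hit list if it is long enough, else its last element, else the default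
lemma findLeftLoop_eq (t : List Int) (needed : Int) (l : List Int) (found fs : Int)
    (hfn : found < needed) (hfs : 0 ≤ fs) (hl : ∀ i ∈ l, 0 ≤ i) :
    findLeftLoop t needed l found fs =
      (let hits := (l.filter (fun i => PySem.List.pyGetD t i 0 == 65 || PySem.List.pyGetD t i 0 == 43)).map (· + 1)
       if needed - found ≤ (hits.length : Int) then hits.getD (needed - found - 1).toNat 0
       else hits.getLastD fs) := by
  induction l generalizing found fs with
  | nil => simp [findLeftLoop]; omega
  | cons i rest ih =>
    have hi : 0 ≤ i := hl i (by simp)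
    have hrest : ∀ j ∈ rest, 0 ≤ j := fun j hj => hl j (by simp [hj])
    simp only [findLeftLoop, List.filter_cons]
    by_cases hb : (PySem.List.pyGetD t i 0 == 65 || PySem.List.pyGetD t i 0 == 43) = true
    · simp only [hb, if_true]
      by_cases heq : found + 1 = needed
      · have h1 : needed - found = 1 := by omega
        simp [heq, h1, if_pos (by omega : (0:Int) ≤ i + 1)]
      · rw [if_neg heq, ih (found + 1) (i + 1) (by omega) (by omega) hrest]
        simp only [List.map_cons, List.length_cons]
        split_ifs with h1 h2 h2
        · have h3 : (needed - found - 1).toNat = (needed - (found+1) - 1).toNat + 1 := by omega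
          rw [h3, List.getD_cons_succ]
        · omega
        · omega
        · rw [List.getLastD_cons]
    · simp only [hb, Bool.false_eq_true, if_false]
      rw [if_neg (by omega : ¬ (found = needed))]
      exact ih found fs hfn hfs hrest

lemma findRightLoop_eq (t : List Int) (needed : Int) (l : List Int) (found fs : Int)
    (hfn : found < needed) (hfs : fs ≤ (t.length : Int)) (hl : ∀ i ∈ l, i + 1 ≤ (t.length : Int)) :
    findRightLoop t needed l found fs =
      (let hits := (l.filter (fun i => PySem.List.pyGetD t i 0 == 65 || PySem.List.pyGetD t i 0 == 43)).map (· + 1)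
       if needed - found ≤ (hits.length : Int) then hits.getD (needed - found - 1).toNat 0
       else hits.getLastD fs) := by
  induction l generalizing found fs with
  | nil => simp [findRightLoop]; omega
  | cons i rest ih =>
    have hi : i + 1 ≤ (t.length : Int) := hl i (by simp)
    have hrest : ∀ j ∈ rest, j + 1 ≤ (t.length : Int) := fun j hj => hl j (by simp [hj])
    simp only [findRightLoop, List.filter_cons]
    by_cases hb : (PySem.List.pyGetD t i 0 == 65 || PySem.List.pyGetD t i 0 == 43) = true
    · simp only [hb, if_true]
      by_cases heq : found + 1 = needed
      · have h1 : needed - found = 1 := by omega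
        simp [heq, h1]
        omega
      · rw [if_neg heq, ih (found + 1) (i + 1) (by omega) hi hrest]
        simp only [List.map_cons, List.length_cons]
        split_ifs with h1 h2 h2
        · have h3 : (needed - found - 1).toNat = (needed - (found+1) - 1).toNat + 1 := by omega
          rw [h3, List.getD_cons_succ]
        · omega
        · omega
        · rw [List.getLastD_cons]
    · simp only [hb, Bool.false_eq_true, if_false]
      rw [if_neg (by omega : ¬ (found = needed))]
      exact ih found fs hfn hfs hrest

-- descending-scan result over the reversed range equals B's ascending hit-list lookup
lemma desc_to_asc (t : List Int) (asc : List Int) (needed fs : Int) (hn : 1 ≤ needed) :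
    (let hits := ((asc.reverse).filter (fun i => PySem.List.pyGetD t i 0 == 65 || PySem.List.pyGetD t i 0 == 43)).map (· + 1)
     if needed ≤ (hits.length : Int) then hits.getD (needed - 1).toNat 0 else hits.getLastD fs) =
    (let hits := (asc.filter (fun i => PySem.List.pyGetD t i 0 == 65 || PySem.List.pyGetD t i 0 == 43)).map (· + 1)
     if needed ≤ (hits.length : Int) then PySem.List.pyGetD hits ((hits.length : Int) - needed) 0
     else hits.headD fs) := by
  simp only [List.filter_reverse, List.map_reverse, List.length_reverse]
  set hits := (asc.filter (fun i => PySem.List.pyGetD t i 0 == 65 || PySem.List.pyGetD t i 0 == 43)).map (· + 1) with hh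
  split_ifs with h
  · have hk : (needed - 1).toNat < hits.length := by omega
    rw [PySem.List.pyGetD_of_nonneg _ _ (by omega)]
    rw [List.getD_eq_getElem?_getD, List.getD_eq_getElem?_getD, List.getElem?_reverse hk]
    congr 2
    omega
  · rw [List.getLastD_eq_getLast?, List.getLast?_reverse, List.headD_eq_head?]

lemma left_eq (t : List Int) (s e : Int) (hs : 0 ≤ s) :
    find_left_context_start t s e = left_context_start_alt t s e := by
  simp only [find_left_context_start, left_context_start_alt, hitList]
  by_cases h : e ≥ (t.length : Int)
  · simp only [if_pos h]
    have h1 : max (-1) (s - 2 * 106 - 1) + 1 = max 0 (s - 2 * 106) := by omega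
    have h2 : s - 2 + 1 = s - 1 := by omega
    rw [PySem.List.pyRange_neg_one_eq_reverse, h1, h2]
    rw [findLeftLoop_eq t (2 * 5) _ 0 s (by norm_num) hs (by
      intro i hi
      rw [List.mem_reverse, PySem.List.mem_pyRange_one] at hi
      omega)]
    simpa using desc_to_asc t _ (2 * 5) s (by norm_num)
  · simp only [if_neg h]
    have h1 : max (-1) (s - 106 - 1) + 1 = max 0 (s - 106) := by omega
    have h2 : s - 2 + 1 = s - 1 := by omega
    rw [PySem.List.pyRange_neg_one_eq_reverse, h1, h2]
    rw [findLeftLoop_eq t 5 _ 0 s (by norm_num) hs (by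
      intro i hi
      rw [List.mem_reverse, PySem.List.mem_pyRange_one] at hi
      omega)]
    simpa using desc_to_asc t _ 5 s (by norm_num)

lemma right_eq (t : List Int) (s e : Int) (he : e ≤ (t.length : Int)) :
    find_right_context_end t s e = right_context_end_alt t s e := by
  simp only [find_right_context_end, right_context_end_alt, hitList]
  by_cases h : s = 0
  · simp only [if_pos h]
    rw [findRightLoop_eq t (2 * 5) _ 0 e (by norm_num) he (by
      intro i hi
      rw [PySem.List.mem_pyRange_one] at hi
      omega)]
    simp only [sub_zero]
    split_ifs with hcond
    · rw [PySem.List.pyGetD_of_nonneg _ _ (by omega)]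
    · rfl
  · simp only [if_neg h]
    rw [findRightLoop_eq t 5 _ 0 e (by norm_num) he (by
      intro i hi
      rw [PySem.List.mem_pyRange_one] at hi
      omega)]
    simp only [sub_zero]
    split_ifs with hcond
    · rw [PySem.List.pyGetD_of_nonneg _ _ (by omega)]
    · rfl

lemma chunk_eq (t : List Int) (p : Nat) (hp : List.idxOf? (50004 : Int) t = some p)
    (clen : Int) (hc : 0 < clen) :
    chunkLoop t (t.length : Int) clen (PySem.List.pyRange 0 (t.length : Int) clen) =
      (PySem.Int.floordiv (p : Int) clen * clen,
       min (t.length : Int) (PySem.Int.floordiv (p : Int) clen * clen + clen)) := by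
  obtain ⟨hplen, hpt, hbefore⟩ := List.idxOf?_eq_some_iff.mp hp
  set q := PySem.Int.floordiv (p : Int) clen with hqdef
  have hqb : q * clen ≤ (p : Int) ∧ (p : Int) < (q + 1) * clen :=
    (PySem.Int.floordiv_eq_iff_of_pos hc).mp rfl
  have hq1 : q * clen ≤ (p : Int) := hqb.1
  have hq2 : (p : Int) < q * clen + clen := by nlinarith [hqb.2]
  have hq0 : 0 ≤ q := by
    by_contra hneg
    have h1 : q + 1 ≤ 0 := by omega
    nlinarith [hqb.2, Int.natCast_nonneg p]
  have hpn : (p : Int) < (t.length : Int) := by exact_mod_cast hplen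
  -- no mask token strictly before index p, hence none in a chunk that ends at or before p
  have hnomem : ∀ j : Int, 0 ≤ j → j * clen + clen ≤ (p : Int) →
      (50004 : Int) ∉ PySem.List.slice t (some (j * clen)) (some (j * clen + clen)) := by
    intro j hj hle hmem
    have hA : 0 ≤ j * clen := by positivity
    rw [PySem.List.slice_toNat t hA (by omega)] at hmem
    obtain ⟨k, hk, hkeq⟩ := List.mem_iff_getElem.mp hmem
    simp only [List.length_take, List.length_drop, lt_min_iff] at hk
    rw [List.getElem_take, List.getElem_drop] at hkeq
    exact hbefore ((j * clen).toNat + k) (by omega) hkeq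
  -- the mask token is inside chunk q
  have hyes : (50004 : Int) ∈ PySem.List.slice t (some (q * clen)) (some (q * clen + clen)) := by
    have hA : 0 ≤ q * clen := by positivity
    rw [PySem.List.slice_toNat t hA (by omega)]
    refine List.mem_iff_getElem.mpr ⟨p - (q * clen).toNat, ?_, ?_⟩
    · simp only [List.length_take, List.length_drop, lt_min_iff]
      constructor <;> omega
    · rw [List.getElem_take, List.getElem_drop]
      have h4 : (q * clen).toNat + (p - (q * clen).toNat) = p := by omega
      simp only [h4]
      exact hpt
  have aux : ∀ d : Nat, ∀ j : Int, 0 ≤ j → j + (d : Int) = q →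
      chunkLoop t (t.length : Int) clen (PySem.List.pyRange (j * clen) (t.length : Int) clen) =
        (q * clen, min (t.length : Int) (q * clen + clen)) := by
    intro d
    induction d with
    | zero =>
      intro j hj hjq
      have hjq' : j = q := by omega
      rw [hjq']
      have hlt : q * clen < (t.length : Int) := by omega
      rw [pyRange_pos_cons _ _ _ hc hlt]
      simp only [chunkLoop, if_pos hyes]
    | succ d ih =>
      intro j hj hjq
      have hmono : (j + 1) * clen ≤ q * clen :=
        mul_le_mul_of_nonneg_right (by omega : j + 1 ≤ q) hc.le
      have hend : j * clen + clen ≤ (p : Int) := by nlinarith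
      have hlt : j * clen < (t.length : Int) := by nlinarith
      rw [pyRange_pos_cons _ _ _ hc hlt]
      simp only [chunkLoop, if_neg (hnomem j hj hend)]
      have harg : j * clen + clen = (j + 1) * clen := by ring
      rw [harg]
      exact ih (j + 1) (by omega) (by omega)
  have h0 : (0 : Int) = 0 * clen := by ring
  rw [h0]
  exact aux q.toNat 0 le_rfl (by omega)

-- ===== VERDICT (by name: the statement is the Claim_ definition above) =====
theorem get_actual_input_spec : Claim_equal_get_actual_input := by
  intro t _
  unfold Spec_get_actual_input
  by_cases hmem : (50004 : Int) ∈ t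
  · obtain ⟨p, hp⟩ : ∃ p, List.idxOf? (50004 : Int) t = some p := by
      cases hi : List.idxOf? (50004 : Int) t with
      | none => exact absurd ((List.idxOf?_eq_none_iff).mp hi) (by simpa using hmem)
      | some p => exact ⟨p, rfl⟩
    have hn1 : 1 ≤ (t.length : Int) := by
      have hne : t ≠ [] := by rintro rfl; simp at hmem
      have hpos : 0 < t.length := List.length_pos_iff.mpr hne
      omega
    have hcnum : 0 < -(PySem.Int.floordiv (-(t.length : Int)) 300) := by
      have hb := (PySem.Int.neg_floordiv_neg_eq_iff_of_pos (by norm_num : (0:Int) < 300)).mp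
        (rfl : -(PySem.Int.floordiv (-(t.length : Int)) 300) = _)
      nlinarith [hb.1, hb.2]
    have hclen : 0 < -(PySem.Int.floordiv (-(t.length : Int)) (-(PySem.Int.floordiv (-(t.length : Int)) 300))) := by
      have hb := (PySem.Int.neg_floordiv_neg_eq_iff_of_pos hcnum).mp
        (rfl : -(PySem.Int.floordiv (-(t.length : Int)) (-(PySem.Int.floordiv (-(t.length : Int)) 300))) = _)
      nlinarith [hb.1, hb.2]
    have hq0 : 0 ≤ PySem.Int.floordiv (p : Int) (-(PySem.Int.floordiv (-(t.length : Int)) (-(PySem.Int.floordiv (-(t.length : Int)) 300)))) := by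
      have hqb := (PySem.Int.floordiv_eq_iff_of_pos hclen).mp
        (rfl : PySem.Int.floordiv (p : Int) (-(PySem.Int.floordiv (-(t.length : Int)) (-(PySem.Int.floordiv (-(t.length : Int)) 300)))) = _)
      by_contra hneg
      rw [not_le] at hneg
      nlinarith [hqb.2, Int.natCast_nonneg p]
    simp only [get_actual_input, get_actual_input_alt, if_pos hmem, PySem.List.index?_eq_idxOf?, hp]
    rw [chunk_eq t p hp _ hclen]
    exact Prod.ext
      (left_eq t _ _ (by positivity))
      (right_eq t _ _ (min_le_left _ _))
  · have hnone : List.idxOf? (50004 : Int) t = none := by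
      rw [List.idxOf?_eq_none_iff]
      simpa using hmem
    simp [get_actual_input, get_actual_input_alt, PySem.List.index?_eq_idxOf?, hmem, hnone]
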